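-- pv_equiv track=rewrite | github.com/fsantini/lishgreek | lishgreek.py | sort_possibilities_by_length
-- ===== SOURCE A (Python) =====
-- def sort_possibilities_by(possibilities, metric_list):
--     new_possibilities = []
--     sorted_indices = [i[0] for i in sorted(enumerate(metric_list), key=lambda x:x[1])]
--     for i in sorted_indices:
--         new_possibilities.append(possibilities[i])
--     return new_possibilities
--
-- def sort_possibilities_by_length(lat_string, possibilities):
--     lat_len = len(lat_string)
--
--     digraphs_to_monographs = 'ch th ps'.split() # digraphs that are always translated into a monograph
--     for digraph in digraphs_to_monographs:
--         lat_len -= lat_string.lower().count(digraph)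
--     greek_length_differences = []
--     for greek_word in possibilities:
--         greek_length_differences.append(abs(len(greek_word) - lat_len))
--
--     return sort_possibilities_by(possibilities, greek_length_differences)
-- ===== SOURCE B (Python) =====
-- def sort_possibilities_by_length(lat_string, possibilities):
--     low = lat_string.lower()
--     lat_len = len(lat_string) - low.count('ch') - low.count('th') - low.count('ps')
--     buckets = {}
--     maxd = -1
--     for w in possibilities:
--         d = abs(len(w) - lat_len)
--         buckets.setdefault(d, []).append(w)
--         if d > maxd:
--             maxd = d
--     out = []
--     for d in range(maxd + 1):
--         out += buckets.get(d, [])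
--     return out
-- ===== Notes on version B (the rewrite author's own statement) =====
-- stated objective: alternative
-- what changed: Replaces A's comparison sort (build a parallel metric list, argsort its enumerate pairs, rebuild by index) with a one-pass distribution sort: words are grouped into a dict of buckets keyed by their distance |len(w)-lat_len| while tracking the maximum distance, then the buckets are read out in order 0..maxd; stability comes from in-order appends, no comparison sort at all.
import Mathlib
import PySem

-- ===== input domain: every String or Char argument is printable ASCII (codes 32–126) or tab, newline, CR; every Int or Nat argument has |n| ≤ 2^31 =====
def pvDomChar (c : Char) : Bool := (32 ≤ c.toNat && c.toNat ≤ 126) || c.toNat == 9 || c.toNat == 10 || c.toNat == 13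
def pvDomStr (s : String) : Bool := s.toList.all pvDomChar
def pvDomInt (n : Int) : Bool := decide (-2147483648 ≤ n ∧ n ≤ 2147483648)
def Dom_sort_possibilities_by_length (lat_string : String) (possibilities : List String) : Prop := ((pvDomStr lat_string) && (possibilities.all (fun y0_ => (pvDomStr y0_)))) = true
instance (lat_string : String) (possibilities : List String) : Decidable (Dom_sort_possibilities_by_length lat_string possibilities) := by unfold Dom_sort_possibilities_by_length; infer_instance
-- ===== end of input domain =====

-- B replaces A's comparison sort (metric list + index argsort + rebuild) with a one-pass
-- distribution (bucket) sort: group words by distance in a dict, then read buckets 0..maxd.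

-- ===== PORT A =====
-- possibilities[i]: in the only call the indices come from enumerate(metric_list) with
-- len(metric_list) = len(possibilities), so the index is always in range; pyGetD is exact here.
def pv_sort_possibilities_by (possibilities : List String) (metric_list : List Int) : List String :=
  let sorted_indices :=
    (PySem.List.sorted (PySem.List.enumerate metric_list) (fun x => x.2) false).map (fun i => i.1)
  sorted_indices.foldl (fun acc i => acc ++ [PySem.List.pyGetD possibilities i ""]) []

def sort_possibilities_by_length (lat_string : String) (possibilities : List String) : List String :=
  let lat_len0 : Int := PySem.Str.len lat_string
  let lat_len : Int :=
    ["ch", "th", "ps"].foldl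
      (fun l digraph => l - (PySem.Str.count (PySem.Str.lower lat_string) digraph : Int)) lat_len0
  let greek_length_differences :=
    possibilities.foldl (fun acc w => acc ++ [|PySem.Str.len w - lat_len|]) ([] : List Int)
  pv_sort_possibilities_by possibilities greek_length_differences

-- ===== PORT B =====
-- buckets.setdefault(d, []).append(w) mutates the list stored at d in place: the dict value
-- at d becomes its old value (default []) with w appended — exactly Dict.modify d [] (· ++ [w]).
def sort_possibilities_by_length_alt (lat_string : String) (possibilities : List String) : List String :=
  let low := PySem.Str.lower lat_string
  let lat_len : Int := (PySem.Str.len lat_string : Int)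
      - PySem.Str.count low "ch" - PySem.Str.count low "th" - PySem.Str.count low "ps"
  let st := possibilities.foldl
    (fun (p : PySem.Dict Int (List String) × Int) w =>
      let d := |PySem.Str.len w - lat_len|
      (p.1.modify d [] (fun l => l ++ [w]), if d > p.2 then d else p.2))
    (PySem.Dict.empty, -1)
  (PySem.List.pyRange 0 (st.2 + 1) 1).foldl (fun acc d => acc ++ st.1.getD d []) []

-- ===== PRECONDITION & SPEC =====
def Spec_sort_possibilities_by_length (lat_string : String) (possibilities : List String) (out : List String) : Prop := out = sort_possibilities_by_length_alt lat_string possibilities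
instance (lat_string : String) (possibilities : List String) (out : List String) : Decidable (Spec_sort_possibilities_by_length lat_string possibilities out) := by unfold Spec_sort_possibilities_by_length; infer_instance

-- ===== CLAIM (what is proved, stated in full; the proofs are below) =====
def Claim_equal_sort_possibilities_by_length : Prop := ∀ (lat_string : String) (possibilities : List String), Dom_sort_possibilities_by_length lat_string possibilities → Spec_sort_possibilities_by_length lat_string possibilities (sort_possibilities_by_length lat_string possibilities)

-- ===== LEMMAS AND PROOFS =====

-- A-side: insertBy of a mapped element into a mapped list, when the comparison factors through the map
lemma insertBy_map {α β : Type} (g : α → β) (key : β → Int) (x : α) (acc : List α) :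
    PySem.List.insertBy (fun a b => decide (key a < key b)) (g x) (acc.map g)
      = (PySem.List.insertBy (fun a b => decide (key (g a) < key (g b))) x acc).map g := by
  induction acc with
  | nil => simp [PySem.List.insertBy]
  | cons y ys ih =>
      simp only [List.map_cons, PySem.List.insertBy]
      by_cases h : key (g x) < key (g y) <;> simp [h, ih]

-- A-side: the stable sort commutes with a map when the key factors through the map
lemma sorted_map_comm {α β : Type} (g : α → β) (key : β → Int) (xs : List α) :
    PySem.List.sorted (xs.map g) key false
      = (PySem.List.sorted xs (fun x => key (g x)) false).map g := by
  rw [PySem.List.sorted_eq_foldl_insertBy, PySem.List.sorted_eq_foldl_insertBy, List.foldl_map]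
  suffices h : ∀ acc : List α,
      xs.foldl (fun a x => PySem.List.insertBy (fun a b => decide (key a < key b)) (g x) a) (acc.map g)
        = (xs.foldl (fun a x => PySem.List.insertBy (fun a b => decide (key (g a) < key (g b))) x a) acc).map g by
    simpa using h []
  induction xs with
  | nil => intro acc; simp
  | cons x t ih => intro acc; simp only [List.foldl_cons, insertBy_map, ih]

-- A-side: enumerate commutes with map (any start)
lemma enumerate_map {α β : Type} (f : α → β) (xs : List α) (s : Int) :
    PySem.List.enumerate (xs.map f) s
      = (PySem.List.enumerate xs s).map (fun p => (p.1, f p.2)) := by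
  induction xs generalizing s with
  | nil => simp [PySem.List.enumerate_nil]
  | cons x t ih => simp [PySem.List.enumerate_cons, ih]

-- A-side: members of enumerate looked up back in the list give their own second component
lemma pyGetD_fst_of_mem_enumerate {α : Type} [Inhabited α] (xs : List α) (d : α)
    (p : Int × α) (hp : p ∈ PySem.List.enumerate xs 0) :
    PySem.List.pyGetD xs p.1 d = p.2 := by
  rw [PySem.List.mem_enumerate_iff] at hp
  obtain ⟨k, hk, rfl⟩ := hp
  simp [PySem.List.pyGetD_natCast, hk]

-- A's whole pipeline on the decorated list equals the stable key-sort of the list itself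
lemma pipeline_eq (f : String → Int) (ps : List String) :
    ((PySem.List.sorted (PySem.List.enumerate (ps.map f)) (fun x => x.2) false).map (fun i => i.1)).map
        (fun i => PySem.List.pyGetD ps i "")
      = PySem.List.sorted ps f false := by
  rw [enumerate_map, sorted_map_comm (g := fun p : Int × String => (p.1, f p.2)) (key := fun x : Int × Int => x.2) (xs := PySem.List.enumerate ps 0)]
  simp only [List.map_map]
  have h2 := sorted_map_comm (g := fun p : Int × String => p.2) (key := f) (xs := PySem.List.enumerate ps 0)
  rw [PySem.List.map_snd_enumerate] at h2
  rw [h2]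
  exact List.map_congr_left (fun p hp =>
    pyGetD_fst_of_mem_enumerate ps "" p ((PySem.List.mem_sorted _ _ _ _).mp hp))

-- B-side: the pair-state fold splits into the bucket fold and the max fold
lemma fold_pair_split (key : String → Int) (ps : List String)
    (dct : PySem.Dict Int (List String)) (m : Int) :
    ps.foldl
      (fun (p : PySem.Dict Int (List String) × Int) w =>
        (p.1.modify (key w) [] (fun l => l ++ [w]), if key w > p.2 then key w else p.2))
      (dct, m)
      = (ps.foldl (fun d w => d.modify (key w) [] (fun l => l ++ [w])) dct,
         ps.foldl (fun m w => if key w > m then key w else m) m) := by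
  induction ps generalizing dct m with
  | nil => rfl
  | cons x t ih => simp only [List.foldl_cons, ih]

-- B-side: the bucket at d collects, in order, exactly the words whose key is d
lemma getD_bucket (key : String → Int) (ps : List String)
    (dct : PySem.Dict Int (List String)) (d : Int) :
    (ps.foldl (fun dd w => dd.modify (key w) [] (fun l => l ++ [w])) dct).getD d []
      = dct.getD d [] ++ ps.filter (fun w => key w == d) := by
  induction ps generalizing dct with
  | nil => simp
  | cons x t ih =>
      simp only [List.foldl_cons, List.filter_cons, ih, PySem.Dict.getD_modify]
      by_cases h : d = key x
      · simp [h]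
      · have h' : (key x == d) = false := by simp; omega
        simp [h, h']

-- B-side: the running max dominates the start and every key seen
lemma fold_max_ge_init (key : String → Int) (ps : List String) (m : Int) :
    m ≤ ps.foldl (fun m w => if key w > m then key w else m) m := by
  induction ps generalizing m with
  | nil => simp
  | cons x t ih =>
      simp only [List.foldl_cons]
      refine le_trans ?_ (ih _)
      split <;> omega

lemma fold_max_ge_key (key : String → Int) (ps : List String) (m : Int)
    (w : String) (hw : w ∈ ps) :
    key w ≤ ps.foldl (fun m w => if key w > m then key w else m) m := by
  induction ps generalizing m with
  | nil => cases hw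
  | cons x t ih =>
      simp only [List.foldl_cons]
      rcases List.mem_cons.mp hw with rfl | hw'
      · refine le_trans ?_ (fold_max_ge_init key t _)
        split <;> omega
      · exact ih _ hw'

-- insert an element of key k after everything with key ≤ k and before everything with key > k
lemma insertBy_split (key : String → Int) (x : String) (A B : List String)
    (hA : ∀ a ∈ A, key a ≤ key x) (hB : ∀ b ∈ B, key x < key b) :
    PySem.List.insertBy (fun a b => decide (key a < key b)) x (A ++ B) = A ++ x :: B := by
  induction A with
  | nil =>
      cases B with
      | nil => simp [PySem.List.insertBy]
      | cons b bs =>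
          have hb : key x < key b := hB b (by simp)
          simp [PySem.List.insertBy, hb]
  | cons a as ih =>
      have ha : ¬ key x < key a := by have := hA a (by simp); omega
      simp only [List.cons_append, PySem.List.insertBy, ha, decide_false]
      simp [ih (fun a h => hA a (by simp [h]))]

-- the stable insertion sort equals the concatenation of buckets 0, 1, …, n-1
lemma foldl_insert_eq_buckets (key : String → Int) (n : Int) (ps : List String)
    (hk : ∀ w ∈ ps, 0 ≤ key w ∧ key w < n) :
    ps.foldl (fun acc x => PySem.List.insertBy (fun a b => decide (key a < key b)) x acc) []
      = (PySem.List.pyRange 0 n 1).flatMap (fun d => ps.filter (fun w => key w == d)) := by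
  induction ps using List.reverseRecOn with
  | nil => simp
  | append_singleton ts x ih =>
      have hx := hk x (by simp)
      have hts : ∀ w ∈ ts, 0 ≤ key w ∧ key w < n := fun w hw => hk w (by simp [hw])
      rw [List.foldl_append, List.foldl_cons, List.foldl_nil, ih hts]
      set k := key x with hkx
      have hsplit : PySem.List.pyRange 0 n 1
          = PySem.List.pyRange 0 (k + 1) 1 ++ PySem.List.pyRange (k + 1) n 1 :=
        PySem.List.pyRange_one_append 0 (k + 1) n (by omega) (by omega)
      have hsplit2 : PySem.List.pyRange 0 (k + 1) 1 = PySem.List.pyRange 0 k 1 ++ [k] :=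
        PySem.List.pyRange_one_succ_right (show (0:Int) ≤ k by omega)
      -- LHS: insert x into (buckets ≤ k) ++ (buckets > k)
      rw [hsplit, List.flatMap_append]
      have hA : ∀ a ∈ (PySem.List.pyRange 0 (k+1) 1).flatMap (fun d => ts.filter (fun w => key w == d)),
          key a ≤ k := by
        intro a ha
        obtain ⟨d, hd, ha⟩ := List.mem_flatMap.mp ha
        have hd' := (PySem.List.mem_pyRange_one).mp hd
        have : (key a == d) = true := (List.mem_filter.mp ha).2
        have : key a = d := by simpa using this
        omega
      have hB : ∀ b ∈ (PySem.List.pyRange (k+1) n 1).flatMap (fun d => ts.filter (fun w => key w == d)),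
          k < key b := by
        intro b hb
        obtain ⟨d, hd, hb⟩ := List.mem_flatMap.mp hb
        have hd' := (PySem.List.mem_pyRange_one).mp hd
        have : (key b == d) = true := (List.mem_filter.mp hb).2
        have : key b = d := by simpa using this
        omega
      rw [insertBy_split key x _ _ hA hB]
      -- RHS: filters over ts ++ [x]
      have hfilt : ∀ d : Int, (ts ++ [x]).filter (fun w => key w == d)
          = ts.filter (fun w => key w == d) ++ (if k = d then [x] else []) := by
        intro d
        rw [List.filter_append]
        congr 1
        by_cases h : k = d
        · simp [List.filter, ← hkx, h]
        · have hne : (key x == d) = false := by simp [← hkx]; omega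
          simp [List.filter, hne, h]
      have hhigh : (PySem.List.pyRange (k+1) n 1).flatMap
            (fun d => (ts ++ [x]).filter (fun w => key w == d))
          = (PySem.List.pyRange (k+1) n 1).flatMap (fun d => ts.filter (fun w => key w == d)) := by
        rw [List.flatMap_def, List.flatMap_def]
        congr 1
        apply List.map_congr_left
        intro d hd
        have hd' := (PySem.List.mem_pyRange_one).mp hd
        rw [hfilt d]
        have : k ≠ d := by omega
        simp [this]
      have hlow : (PySem.List.pyRange 0 (k+1) 1).flatMap
            (fun d => (ts ++ [x]).filter (fun w => key w == d))
          = (PySem.List.pyRange 0 (k+1) 1).flatMap (fun d => ts.filter (fun w => key w == d)) ++ [x] := by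
        rw [hsplit2, List.flatMap_append, List.flatMap_append]
        have h1 : (PySem.List.pyRange 0 k 1).flatMap
              (fun d => (ts ++ [x]).filter (fun w => key w == d))
            = (PySem.List.pyRange 0 k 1).flatMap (fun d => ts.filter (fun w => key w == d)) := by
          rw [List.flatMap_def, List.flatMap_def]
          congr 1
          apply List.map_congr_left
          intro d hd
          have hd' := (PySem.List.mem_pyRange_one).mp hd
          rw [hfilt d]
          have : k ≠ d := by omega
          simp [this]
        rw [h1, List.append_assoc]
        congr 1
        simp only [List.flatMap_cons, List.flatMap_nil, List.append_nil, hfilt k]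
        simp
      rw [List.flatMap_append, hhigh, hlow, List.append_assoc]
      simp
-- ===== VERDICT (by name: the statement is the Claim_ definition above) =====
theorem sort_possibilities_by_length_spec : Claim_equal_sort_possibilities_by_length := by
  intro lat ps _
  show sort_possibilities_by_length lat ps = sort_possibilities_by_length_alt lat ps
  unfold sort_possibilities_by_length sort_possibilities_by_length_alt pv_sort_possibilities_by
  simp only [List.foldl_cons, List.foldl_nil, PySem.List.foldl_append_singleton_eq_map,
    List.nil_append]
  set L : Int := (PySem.Str.len lat : Int) - PySem.Str.count (PySem.Str.lower lat) "ch"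
      - PySem.Str.count (PySem.Str.lower lat) "th" - PySem.Str.count (PySem.Str.lower lat) "ps" with hL
  -- A's side: pipeline = stable key-sort
  have hA := pipeline_eq (fun w => |PySem.Str.len w - L|) ps
  rw [List.map_map] at hA ⊢
  rw [hA]
  -- B's side: split the pair fold, read off buckets and the max
  rw [fold_pair_split (fun w => |PySem.Str.len w - L|) ps PySem.Dict.empty (-1)]
  set M : Int := ps.foldl
      (fun m w => if |PySem.Str.len w - L| > m then |PySem.Str.len w - L| else m) (-1) with hM
  rw [PySem.List.foldl_append_eq_flatMap]
  simp only [getD_bucket (fun w => |PySem.Str.len w - L|) ps PySem.Dict.empty,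
    PySem.Dict.getD_empty, List.nil_append]
  -- keys are nonnegative and bounded by M
  have hM0 : (-1 : Int) ≤ M := hM ▸ fold_max_ge_init (fun w => |PySem.Str.len w - L|) ps (-1)
  have hk : ∀ w ∈ ps, 0 ≤ |PySem.Str.len w - L| ∧ |PySem.Str.len w - L| < M + 1 := by
    intro w hw
    refine ⟨abs_nonneg _, ?_⟩
    have h2 := fold_max_ge_key (fun w => |PySem.Str.len w - L|) ps (-1) w hw
    beta_reduce at h2
    rw [← hM] at h2
    omega
  rw [PySem.List.sorted_eq_foldl_insertBy]
  exact foldl_insert_eq_buckets (fun w => |PySem.Str.len w - L|) (M + 1) ps hk
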